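-- pv_equiv track=rewrite | github.com/kkowenn/algorirhm-design | week13/flapBird.py | BFS
-- ===== SOURCE A (Python) =====
-- import copy
--
-- class State:
--     def __init__(self, H, T):
--         self.height = 0
--         self.interval = 0
--         self.H = H
--         self.T = T
--         self.path = []
--
-- def conflict(obstacles, state):
--     if obstacles[state.interval][state.height] == 1:
--         return True
--     else:
--         return False
--
-- def goal(state):
--     return state.interval == state.T
--
-- def successors(state, obstacles):
--     succ = []
--     for d in [-1, 0, 1]:
--         if 0 <= state.height + d < state.H:
--             newState = copy.deepcopy(state)
--             newState.height += d
--             newState.interval += 1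
--             newState.path.append(newState.height)
--             if not conflict(obstacles, newState):
--                 succ.append(newState)
--     return succ
--
-- def BFS(H, T, obstacles):
--     Q = [State(H, T)]
--     while Q:
--         s = Q.pop(0)
--         if goal(s):
--             return s.path
--         Q.extend(successors(s, obstacles))
--     return None
-- ===== SOURCE B (Python) =====
-- def BFS(H, T, obstacles):
--     # Level-by-level BFS with per-level dedup of heights (first generator wins),
--     # carrying the path in each frontier entry; exponential duplicate expansion disappears.
--     if T == 0:
--         return []
--     if H <= 0 or T < 0:
--         return None
--     frontier = [(0, [])]
--     for interval in range(1, T + 1):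
--         nxt = []
--         seen = set()
--         for h, path in frontier:
--             for d in (-1, 0, 1):
--                 nh = h + d
--                 if 0 <= nh < H and nh not in seen and obstacles[interval][nh] != 1:
--                     seen.add(nh)
--                     nxt.append((nh, path + [nh]))
--         if not nxt:
--             return None
--         frontier = nxt
--     return frontier[0][1]
-- ===== Notes on version B (the rewrite author's own statement) =====
-- stated objective: faster
-- what changed: A explores every path with a FIFO queue of whole states and no visited set (exponentially many duplicates); B walks the intervals level by level keeping at most one frontier entry per height (first generator wins, same d=-1,0,1 successor order), which returns the identical first goal path.
-- outside the precondition, e.g. on BFS(2, 3, [[0], [1, 1]]): A returns None, B returns None; on BFS(1, -1, [[0], [1]]): A returns None, B returns None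
import Mathlib
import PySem

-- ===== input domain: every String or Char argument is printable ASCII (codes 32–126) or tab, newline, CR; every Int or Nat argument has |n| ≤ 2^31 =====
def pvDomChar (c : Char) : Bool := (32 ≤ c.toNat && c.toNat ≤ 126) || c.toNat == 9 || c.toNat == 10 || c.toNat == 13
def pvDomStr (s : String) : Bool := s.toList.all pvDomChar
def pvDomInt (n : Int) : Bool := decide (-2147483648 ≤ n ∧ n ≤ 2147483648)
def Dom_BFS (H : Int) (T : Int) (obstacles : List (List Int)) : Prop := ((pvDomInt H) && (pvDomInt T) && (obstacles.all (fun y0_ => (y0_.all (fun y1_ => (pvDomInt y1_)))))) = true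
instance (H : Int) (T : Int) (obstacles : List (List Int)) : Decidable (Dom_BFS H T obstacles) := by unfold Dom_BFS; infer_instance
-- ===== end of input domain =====

-- B replaces A's duplicate-exploding queue BFS by a level-by-level BFS that keeps at most one
-- frontier entry per height (first generator wins, same d = -1,0,1 order): exponentially fewer states explored.


-- ===== PORT A =====
-- A state is (height, interval, path); H and T, constant in every State, stay parameters.
-- Python's obstacles[i][h] may raise IndexError: pyConflict? returns none exactly there, the
-- none bubbles up and the loop result is none; Pre_BFS excludes those inputs.
def pyConflict? (obstacles : List (List Int)) (i h : Int) : Option Bool :=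
  (PySem.List.pyGet? obstacles i).bind fun row =>
    (PySem.List.pyGet? row h).map (fun v => v == 1)

-- the `for d in [-1, 0, 1]` loop of `successors`, as structural recursion on the d-list
def succAux (H : Int) (obstacles : List (List Int)) (s : Int × Int × List Int) :
    List Int → Option (List (Int × Int × List Int))
  | [] => some []
  | d :: ds =>
    if 0 ≤ s.1 + d ∧ s.1 + d < H then
      match pyConflict? obstacles (s.2.1 + 1) (s.1 + d) with
      | none => none
      | some true => succAux H obstacles s ds
      | some false =>
          (succAux H obstacles s ds).map
            (fun l => (s.1 + d, s.2.1 + 1, s.2.2 ++ [s.1 + d]) :: l)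
    else succAux H obstacles s ds

def successorsA (H : Int) (obstacles : List (List Int)) (s : Int × Int × List Int) :
    Option (List (Int × Int × List Int)) :=
  succAux H obstacles s [-1, 0, 1]

-- termination facts for bfsLoop (cited in decreasing_by)
lemma succAux_sound (H : Int) (obstacles : List (List Int)) (s : Int × Int × List Int) :
    ∀ (ds : List Int) (l : List (Int × Int × List Int)),
      succAux H obstacles s ds = some l →
      ∀ c ∈ l, c.2.1 = s.2.1 + 1 ∧ s.2.1 + 1 < (obstacles.length : Int) := by
  intro ds
  induction ds with
  | nil => intro l hl c hc; simp [succAux] at hl; subst hl; simp at hc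
  | cons d ds ih =>
    intro l hl c hc
    simp only [succAux] at hl
    split at hl
    · rcases hconf : pyConflict? obstacles (s.2.1 + 1) (s.1 + d) with _ | b
      · rw [hconf] at hl; simp at hl
      · rw [hconf] at hl
        have hlt : s.2.1 + 1 < (obstacles.length : Int) := by
          rcases hrow : PySem.List.pyGet? obstacles (s.2.1 + 1) with _ | row
          · simp [pyConflict?, hrow] at hconf
          · have := PySem.List.pyGet?_eq_none_iff (xs := obstacles) (i := s.2.1 + 1)
            by_cases h2 : s.2.1 + 1 < (obstacles.length : Int)
            · exact h2
            · exfalso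
              have : PySem.List.pyGet? obstacles (s.2.1 + 1) = none := by
                rw [PySem.List.pyGet?_eq_none_iff]
                simp [PySem.Raise.InRange]
                omega
              rw [this] at hrow; cases hrow
        cases b with
        | true => exact ⟨(ih l hl c hc).1, hlt⟩
        | false =>
          rcases hrec : succAux H obstacles s ds with _ | l'
          · rw [hrec] at hl; simp at hl
          · rw [hrec] at hl
            simp only [Option.map_some, Option.some.injEq] at hl
            subst hl
            rcases List.mem_cons.mp hc with h | h
            · subst h; exact ⟨rfl, hlt⟩
            · exact ⟨(ih l' hrec c h).1, hlt⟩
    · exact ih l hl c hc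

lemma succAux_length (H : Int) (obstacles : List (List Int)) (s : Int × Int × List Int) :
    ∀ (ds : List Int) (l : List (Int × Int × List Int)),
      succAux H obstacles s ds = some l → l.length ≤ ds.length := by
  intro ds
  induction ds with
  | nil => intro l hl; simp [succAux] at hl; subst hl; simp
  | cons d ds ih =>
    intro l hl
    simp only [succAux] at hl
    split at hl
    · rcases hconf : pyConflict? obstacles (s.2.1 + 1) (s.1 + d) with _ | b
      · rw [hconf] at hl; simp at hl
      · rw [hconf] at hl
        cases b with
        | true => exact le_trans (ih l hl) (by simp)
        | false =>
          rcases hrec : succAux H obstacles s ds with _ | l'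
          · rw [hrec] at hl; simp at hl
          · rw [hrec] at hl
            simp only [Option.map_some, Option.some.injEq] at hl
            subst hl
            simpa using ih l' hrec
    · exact le_trans (ih l hl) (by simp)

-- the `while Q:` loop; measure: Σ 4^(len(obstacles)+1-interval) over the queue
def bfsLoop (H T : Int) (obstacles : List (List Int)) :
    List (Int × Int × List Int) → Option (List Int)
  | [] => none
  | s :: rest =>
    if s.2.1 == T then some s.2.2
    else
      match h : successorsA H obstacles s with
      | none => none
      | some l => bfsLoop H T obstacles (rest ++ l)
termination_by Q => (Q.map (fun s => 4 ^ ((obstacles.length : Int) + 1 - s.2.1).toNat)).sum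
decreasing_by
  simp only [List.map_append, List.sum_append, List.map_cons, List.sum_cons]
  have hwt : ∀ c ∈ l, (4 : ℕ) ^ ((obstacles.length : Int) + 1 - c.2.1).toNat
      = 4 ^ ((obstacles.length : Int) - s.2.1).toNat := by
    intro c hc
    obtain ⟨h1, h2⟩ := succAux_sound H obstacles s _ l h c hc
    rw [h1]
    congr 1
    omega
  have hsum : (l.map (fun c => (4:ℕ) ^ ((obstacles.length : Int) + 1 - c.2.1).toNat)).sum
      < 4 ^ ((obstacles.length : Int) + 1 - s.2.1).toNat := by
    rcases l with _ | ⟨c0, l'⟩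
    · simp
    · obtain ⟨h1, h2⟩ := succAux_sound H obstacles s _ _ h c0 (by simp)
      have hexp : ((obstacles.length : Int) + 1 - s.2.1).toNat
          = ((obstacles.length : Int) - s.2.1).toNat + 1 := by omega
      have hlen : (c0 :: l').length ≤ 3 := succAux_length H obstacles s _ _ h
      calc ((c0 :: l').map (fun c => (4:ℕ) ^ ((obstacles.length : Int) + 1 - c.2.1).toNat)).sum
          = ((c0 :: l').map (fun _ => (4:ℕ) ^ ((obstacles.length : Int) - s.2.1).toNat)).sum := by
            exact congrArg List.sum (List.map_congr_left hwt)
        _ = (c0 :: l').length * 4 ^ ((obstacles.length : Int) - s.2.1).toNat := by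
            rw [List.map_const']; simp [List.sum_replicate]
        _ ≤ 3 * 4 ^ ((obstacles.length : Int) - s.2.1).toNat :=
            Nat.mul_le_mul_right _ hlen
        _ < 4 * 4 ^ ((obstacles.length : Int) - s.2.1).toNat := by
            have : 0 < (4:ℕ) ^ ((obstacles.length : Int) - s.2.1).toNat := by positivity
            omega
        _ = 4 ^ ((obstacles.length : Int) + 1 - s.2.1).toNat := by rw [hexp, pow_succ]; ring
  omega

def BFS (H : Int) (T : Int) (obstacles : List (List Int)) : Option (List Int) :=
  bfsLoop H T obstacles [(0, 0, [])]

-- ===== PORT B =====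
-- one interval of B: fold over the frontier (height, path) pairs; `seen` is the per-level set
def stepB (H : Int) (obstacles : List (List Int)) (interval : Int)
    (frontier : List (Int × List Int)) : PySem.Set Int × List (Int × List Int) :=
  frontier.foldl (fun st p =>
    ([-1, 0, 1] : List Int).foldl (fun st d =>
      if 0 ≤ p.1 + d ∧ p.1 + d < H ∧ (p.1 + d) ∉ st.1 ∧
          PySem.List.pyGetD (PySem.List.pyGetD obstacles interval []) (p.1 + d) 0 ≠ 1
      then (PySem.Set.add st.1 (p.1 + d), st.2 ++ [(p.1 + d, p.2 ++ [p.1 + d])])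
      else st) st) (PySem.Set.empty, [])

-- the `for interval in range(1, T+1)` loop of B, one Nat step per interval
def levelsB (H : Int) (obstacles : List (List Int)) :
    Nat → Int → List (Int × List Int) → Option (List Int)
  | 0, _, frontier => frontier.head?.map (·.2)
  | k + 1, interval, frontier =>
    let nxt := (stepB H obstacles interval frontier).2
    if nxt = [] then none else levelsB H obstacles k (interval + 1) nxt

def BFS_alt (H : Int) (T : Int) (obstacles : List (List Int)) : Option (List Int) :=
  if T == 0 then some []
  else if H ≤ 0 ∨ T < 0 then none
  else levelsB H obstacles T.toNat 1 [(0, [])]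

-- ===== PRECONDITION & SPEC =====
-- Pre_ excludes inputs whose obstacle grid does not cover rows 1..T up to height H: there A
-- raises IndexError (or, when every path is blocked or T < 0 with 0 < H, happens to return
-- None before reaching the missing cells, an accident of the grid shape).
def Pre_BFS (H : Int) (T : Int) (obstacles : List (List Int)) : Prop :=
  H ≤ 0 ∨ T = 0 ∨
    (0 < T ∧ T < (obstacles.length : Int) ∧
      ∀ row ∈ (obstacles.drop 1).take T.toNat, H ≤ (row.length : Int))
instance (H : Int) (T : Int) (obstacles : List (List Int)) : Decidable (Pre_BFS H T obstacles) := by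
  unfold Pre_BFS; infer_instance

def pvWitness_BFS : Int × Int × List (List Int) := (2, 2, [[0, 0], [0, 0], [1, 0]])

def Spec_BFS (H : Int) (T : Int) (obstacles : List (List Int)) (out : Option (List Int)) : Prop :=
  out = BFS_alt H T obstacles
instance (H : Int) (T : Int) (obstacles : List (List Int)) (out : Option (List Int)) :
    Decidable (Spec_BFS H T obstacles out) := by unfold Spec_BFS; infer_instance

-- ===== CLAIM (what is proved, stated in full; the proofs are below) =====
def Claim_equal_BFS : Prop := ∀ (H : Int) (T : Int) (obstacles : List (List Int)), Dom_BFS H T obstacles → Pre_BFS H T obstacles → Spec_BFS H T obstacles (BFS H T obstacles)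

-- ===== LEMMAS AND PROOFS =====

-- proof-side model: the successor heights of height h at interval i, and level lists
def valids (H : Int) (obstacles : List (List Int)) (i h : Int) (ds : List Int) : List Int :=
  (ds.map (fun d => h + d)).filter
    (fun nh => decide (0 ≤ nh) && decide (nh < H) &&
      !(PySem.List.pyGetD (PySem.List.pyGetD obstacles i []) nh 0 == 1))

def succP (H : Int) (obstacles : List (List Int)) (i : Int) (p : Int × List Int) :
    List (Int × List Int) :=
  (valids H obstacles i p.1 [-1, 0, 1]).map (fun nh => (nh, p.2 ++ [nh]))

def lev (H : Int) (obstacles : List (List Int)) : Nat → List (Int × List Int)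
  | 0 => [(0, [])]
  | k + 1 => (lev H obstacles k).flatMap (succP H obstacles ((k : Int) + 1))

def stateOf (k : Nat) (p : Int × List Int) : Int × Int × List Int := (p.1, (k : Int), p.2)

-- the dedup step B performs per generated pair
def dstep (st : PySem.Set Int × List (Int × List Int)) (q : Int × List Int) :
    PySem.Set Int × List (Int × List Int) :=
  if q.1 ∈ st.1 then st else (PySem.Set.add st.1 q.1, st.2 ++ [q])


-- output of a dstep fold: the accumulator is only appended to
lemma dstep_out_append :
    ∀ (l : List (Int × List Int)) (st : PySem.Set Int × List (Int × List Int)),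
      (l.foldl dstep st).2 = st.2 ++ (l.foldl dstep (st.1, [])).2 := by
  intro l
  induction l with
  | nil => simp
  | cons q l ih =>
    intro st
    simp only [List.foldl_cons, dstep]
    by_cases hq : q.1 ∈ st.1
    · simp only [hq, if_pos]
      exact ih st
    · simp only [hq, if_neg, not_false_iff]
      rw [ih (PySem.Set.add st.1 q.1, st.2 ++ [q]), ih (PySem.Set.add st.1 q.1, [] ++ [q])]
      simp

-- the seen component of a dstep fold collects exactly the keys
lemma dstep_seen_mem :
    ∀ (l : List (Int × List Int)) (st : PySem.Set Int × List (Int × List Int)) (x : Int),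
      x ∈ (l.foldl dstep st).1 ↔ x ∈ st.1 ∨ x ∈ l.map (·.1) := by
  intro l
  induction l with
  | nil => simp
  | cons q l ih =>
    intro st x
    simp only [List.foldl_cons, dstep, List.map_cons, List.mem_cons]
    by_cases hq : q.1 ∈ st.1
    · simp only [hq, if_pos, ih]
      constructor
      · rintro (h | h)
        · exact Or.inl h
        · exact Or.inr (Or.inr h)
      · rintro (h | h | h)
        · exact Or.inl h
        · exact Or.inl (h ▸ hq)
        · exact Or.inr h
    · simp only [hq, if_neg, not_false_iff, ih, PySem.Set.mem_add]
      tauto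

-- pairs whose keys are already seen are skipped entirely
lemma dstep_skip :
    ∀ (l : List (Int × List Int)) (st : PySem.Set Int × List (Int × List Int)),
      (∀ q ∈ l, q.1 ∈ st.1) → l.foldl dstep st = st := by
  intro l
  induction l with
  | nil => intro st _; rfl
  | cons q l ih =>
    intro st hl
    simp only [List.foldl_cons, dstep, hl q (by simp), if_pos]
    exact ih st (fun q hq => hl q (by simp [hq]))

-- keys of succP are the valid successor heights
lemma succP_keys (H : Int) (obstacles : List (List Int)) (i : Int) (p : Int × List Int) :
    (succP H obstacles i p).map (·.1) = valids H obstacles i p.1 [-1, 0, 1] := by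
  simp only [succP, List.map_map]
  have : ((fun x : Int × List Int => x.1) ∘ fun nh : Int => (nh, p.2 ++ [nh])) = id := by
    funext nh; rfl
  rw [this, List.map_id]

-- CRUX: deduplicating the frontier does not change the deduplicated next level
lemma crux (H : Int) (obstacles : List (List Int)) (i : Int) :
    ∀ (l : List (Int × List Int)) (S : PySem.Set Int)
      (st : PySem.Set Int × List (Int × List Int)),
      (∀ h ∈ S, ∀ nh ∈ valids H obstacles i h [-1, 0, 1], nh ∈ st.1) →
      ((l.flatMap (succP H obstacles i)).foldl dstep st).2
        = ((((l.foldl dstep (S, [])).2).flatMap (succP H obstacles i)).foldl dstep st).2 := by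
  intro l
  induction l with
  | nil => intro S st _; simp
  | cons p ps ih =>
    intro S st cov
    simp only [List.flatMap_cons, List.foldl_append, List.foldl_cons]
    by_cases hp : p.1 ∈ S
    · have hskip : (succP H obstacles i p).foldl dstep st = st := by
        refine dstep_skip _ _ (fun q hq => ?_)
        have : q.1 ∈ (succP H obstacles i p).map (·.1) := List.mem_map_of_mem hq
        rw [succP_keys] at this
        exact cov p.1 hp q.1 this
      rw [hskip]
      have hd : dstep (S, []) p = (S, []) := by simp [dstep, hp]
      rw [hd]
      exact ih S st cov
    · have hd : dstep (S, []) p = (PySem.Set.add S p.1, [p]) := by simp [dstep, hp]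
      rw [hd, dstep_out_append ps (PySem.Set.add S p.1, [p])]
      simp only [List.flatMap_cons, List.cons_append, List.nil_append, List.foldl_append]
      refine ih (PySem.Set.add S p.1) ((succP H obstacles i p).foldl dstep st) ?_
      intro h hh nh hnh
      rw [dstep_seen_mem]
      rcases (PySem.Set.mem_add S p.1 h).mp hh with h' | h'
      · exact Or.inl (cov h h' nh hnh)
      · subst h'
        rw [succP_keys]
        exact Or.inr hnh

-- the head (and emptiness) of the deduplicated list is that of the original
lemma dk_out_head (l : List (Int × List Int)) :
    ((l.foldl dstep (PySem.Set.empty, [])).2).head? = l.head? := by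
  cases l with
  | nil => rfl
  | cons p l =>
    simp only [List.foldl_cons]
    have hd : dstep (PySem.Set.empty, []) p = (PySem.Set.add PySem.Set.empty p.1, [p]) := by
      simp [dstep, PySem.Set.empty_eq]
    rw [hd, dstep_out_append l (PySem.Set.add PySem.Set.empty p.1, [p])]
    simp

-- the inner d-loop of stepB is a dstep fold over the succP pairs
lemma inner_eq (H : Int) (obstacles : List (List Int)) (i : Int) (p : Int × List Int) :
    ∀ (ds : List Int) (st : PySem.Set Int × List (Int × List Int)),
      ds.foldl (fun st d =>
        if 0 ≤ p.1 + d ∧ p.1 + d < H ∧ (p.1 + d) ∉ st.1 ∧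
            PySem.List.pyGetD (PySem.List.pyGetD obstacles i []) (p.1 + d) 0 ≠ 1
        then (PySem.Set.add st.1 (p.1 + d), st.2 ++ [(p.1 + d, p.2 ++ [p.1 + d])])
        else st) st
      = ((valids H obstacles i p.1 ds).map (fun nh => (nh, p.2 ++ [nh]))).foldl dstep st := by
  intro ds
  induction ds with
  | nil => intro st; simp [valids]
  | cons d ds ih =>
    intro st
    simp only [List.foldl_cons, valids, List.map_cons, List.filter_cons]
    by_cases hval : 0 ≤ p.1 + d ∧ p.1 + d < H ∧
        PySem.List.pyGetD (PySem.List.pyGetD obstacles i []) (p.1 + d) 0 ≠ 1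
    · have hb : (decide (0 ≤ p.1 + d) && decide (p.1 + d < H) &&
          !(PySem.List.pyGetD (PySem.List.pyGetD obstacles i []) (p.1 + d) 0 == 1)) = true := by
        simp [hval.1, hval.2.1, hval.2.2]
      rw [if_pos hb]
      simp only [List.map_cons, List.foldl_cons]
      by_cases hmem : (p.1 + d) ∈ st.1
      · have : ¬ (0 ≤ p.1 + d ∧ p.1 + d < H ∧ (p.1 + d) ∉ st.1 ∧
            PySem.List.pyGetD (PySem.List.pyGetD obstacles i []) (p.1 + d) 0 ≠ 1) := by
          tauto
        rw [if_neg this]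
        have hd : dstep st (p.1 + d, p.2 ++ [p.1 + d]) = st := by simp [dstep, hmem]
        rw [hd]
        simpa [valids] using ih st
      · have hcond : (0 ≤ p.1 + d ∧ p.1 + d < H ∧ (p.1 + d) ∉ st.1 ∧
            PySem.List.pyGetD (PySem.List.pyGetD obstacles i []) (p.1 + d) 0 ≠ 1) := by
          tauto
        rw [if_pos hcond]
        have hd : dstep st (p.1 + d, p.2 ++ [p.1 + d])
            = (PySem.Set.add st.1 (p.1 + d), st.2 ++ [(p.1 + d, p.2 ++ [p.1 + d])]) := by
          simp [dstep, hmem]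
        rw [hd]
        simpa [valids] using
          ih (PySem.Set.add st.1 (p.1 + d), st.2 ++ [(p.1 + d, p.2 ++ [p.1 + d])])
    · have hb : (decide (0 ≤ p.1 + d) && decide (p.1 + d < H) &&
          !(PySem.List.pyGetD (PySem.List.pyGetD obstacles i []) (p.1 + d) 0 == 1)) = false := by
        by_cases h0 : 0 ≤ p.1 + d <;> by_cases h1 : p.1 + d < H <;>
          by_cases h2 : PySem.List.pyGetD (PySem.List.pyGetD obstacles i []) (p.1 + d) 0 = 1 <;>
          simp [h0, h1, h2] <;> tauto
      have hprop : ¬ (0 ≤ p.1 + d ∧ p.1 + d < H ∧ (p.1 + d) ∉ st.1 ∧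
          PySem.List.pyGetD (PySem.List.pyGetD obstacles i []) (p.1 + d) 0 ≠ 1) := by
        tauto
      rw [if_neg hprop, if_neg (by rw [hb]; exact fun h => Bool.false_ne_true h)]
      simpa [valids] using ih st

-- stepB is the dstep fold over the flattened successor pairs
lemma stepB_eq (H : Int) (obstacles : List (List Int)) (i : Int)
    (frontier : List (Int × List Int)) :
    stepB H obstacles i frontier
      = (frontier.flatMap (succP H obstacles i)).foldl dstep (PySem.Set.empty, []) := by
  rw [List.foldl_flatMap]
  unfold stepB
  congr 1
  funext st p
  simpa [succP] using inner_eq H obstacles i p [-1, 0, 1] st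


-- inside the admitted grid, succAux computes exactly the succP successors (as states)
lemma succ_ok (H T : Int) (obstacles : List (List Int))
    (hrow : ∀ m : Nat, m < T.toNat →
      ∃ row, obstacles[m + 1]? = some row ∧ H ≤ (row.length : Int)) :
    ∀ (k : Nat), k < T.toNat → ∀ (p : Int × List Int) (ds : List Int),
      succAux H obstacles (stateOf k p) ds
        = some ((valids H obstacles ((k : Int) + 1) p.1 ds).map
            (fun nh => ((nh, (k : Int) + 1, p.2 ++ [nh]) : Int × Int × List Int))) := by
  intro k hk p ds
  obtain ⟨ph, pp⟩ := p
  dsimp only [stateOf]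
  obtain ⟨row, hrowk, hHrow⟩ := hrow k hk
  have hget : PySem.List.pyGet? obstacles ((k : Int) + 1) = some row := by
    have hc : ((k : Int) + 1) = ((k + 1 : Nat) : Int) := by push_cast; ring
    rw [hc, PySem.List.pyGet?_natCast, hrowk]
  have hgetD : PySem.List.pyGetD obstacles ((k : Int) + 1) [] = row := by
    have hc : ((k : Int) + 1) = ((k + 1 : Nat) : Int) := by push_cast; ring
    rw [hc, PySem.List.pyGetD_natCast]
    rw [List.getD_eq_getElem?_getD, hrowk]
    rfl
  induction ds with
  | nil => simp [succAux, valids]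
  | cons d ds ih =>
    simp only [succAux]
    by_cases hv : 0 ≤ ph + d ∧ ph + d < H
    · have hlt : (ph + d).toNat < row.length := by omega
      have hrownh : PySem.List.pyGet? row (ph + d) = some row[(ph + d).toNat] :=
        PySem.List.pyGet?_eq_some_getElem row hv.1 (by omega)
      have hconf : pyConflict? obstacles ((k : Int) + 1) (ph + d)
          = some (row[(ph + d).toNat] == 1) := by
        simp [pyConflict?, hget, hrownh]
      have hcell : PySem.List.pyGetD (PySem.List.pyGetD obstacles ((k : Int) + 1) [])
          (ph + d) 0 = row[(ph + d).toNat] := by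
        rw [hgetD]
        rw [PySem.List.pyGetD_eq_getElem (d := 0) row hv.1 (by omega)]
      rw [if_pos hv, hconf]
      by_cases hc : row[(ph + d).toNat] = 1
      · have : (row[(ph + d).toNat] == 1) = true := by simp [hc]
        rw [this]
        rw [ih]
        congr 1
        simp only [valids, List.map_cons, List.filter_cons, hcell]
        have : (decide (0 ≤ ph + d) && decide (ph + d < H) &&
            !(row[(ph + d).toNat] == 1)) = false := by simp [hc]
        rw [if_neg (by rw [this]; exact fun h => Bool.false_ne_true h)]
      · have : (row[(ph + d).toNat] == 1) = false := by simp [hc]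
        rw [this]
        rw [ih]
        simp only [Option.map_some, Option.some.injEq]
        simp only [valids, List.map_cons, List.filter_cons, hcell]
        have hb : (decide (0 ≤ ph + d) && decide (ph + d < H) &&
            !(row[(ph + d).toNat] == 1)) = true := by simp [hv.1, hv.2, hc]
        rw [if_pos hb]
        simp
    · rw [if_neg hv, ih]
      congr 1
      simp only [valids, List.map_cons, List.filter_cons]
      have : (decide (0 ≤ ph + d) && decide (ph + d < H) &&
          !(PySem.List.pyGetD (PySem.List.pyGetD obstacles ((k:Int)+1) []) (ph + d) 0 == 1))
          = false := by
        rcases not_and_or.mp hv with h | h <;> simp [h] <;> tauto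
      rw [if_neg (by rw [this]; exact fun h => Bool.false_ne_true h)]

-- pushing the whole pending level of the queue through bfsLoop
lemma loopA (H T : Int) (obstacles : List (List Int))
    (hrow : ∀ m : Nat, m < T.toNat →
      ∃ row, obstacles[m + 1]? = some row ∧ H ≤ (row.length : Int))
    (hT : 0 ≤ T) (k : Nat) (hk : k < T.toNat) :
    ∀ (pending : List (Int × List Int)) (acc : List (Int × Int × List Int)),
      bfsLoop H T obstacles ((pending.map (stateOf k)) ++ acc)
        = bfsLoop H T obstacles
            (acc ++ (pending.flatMap (succP H obstacles ((k : Int) + 1))).map (stateOf (k + 1))) := by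
  intro pending
  induction pending with
  | nil => intro acc; simp
  | cons p ps ih =>
    intro acc
    simp only [List.map_cons, List.cons_append]
    rw [bfsLoop]
    have hne : ((stateOf k p).2.1 == T) = false := by
      simp only [stateOf, beq_eq_false_iff_ne, ne_eq]
      intro h
      omega
    rw [hne]
    simp only [Bool.false_eq_true, if_false]
    have hsucc : successorsA H obstacles (stateOf k p)
        = some ((succP H obstacles ((k : Int) + 1) p).map (stateOf (k + 1))) := by
      rw [successorsA, succ_ok H T obstacles hrow k hk p]
      congr 1
      simp only [succP, List.map_map]
      apply List.map_congr_left
      intro nh _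
      simp only [Function.comp_apply, stateOf]
      push_cast
      rfl
    rw [hsucc]
    show bfsLoop H T obstacles ((List.map (stateOf k) ps ++ acc)
        ++ (succP H obstacles ((k : Int) + 1) p).map (stateOf (k + 1))) = _
    rw [List.append_assoc]
    rw [ih (acc ++ (succP H obstacles ((k : Int) + 1) p).map (stateOf (k + 1)))]
    simp [List.append_assoc]

-- iterating loopA from level 0 to level T.toNat
lemma levelsA (H T : Int) (obstacles : List (List Int))
    (hrow : ∀ m : Nat, m < T.toNat →
      ∃ row, obstacles[m + 1]? = some row ∧ H ≤ (row.length : Int))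
    (hT : 0 ≤ T) :
    ∀ (m j : Nat), m + j = T.toNat →
      bfsLoop H T obstacles ((lev H obstacles j).map (stateOf j))
        = bfsLoop H T obstacles ((lev H obstacles T.toNat).map (stateOf T.toNat)) := by
  intro m
  induction m with
  | zero => intro j hj; rw [Nat.zero_add] at hj; subst hj; rfl
  | succ m ih =>
    intro j hj
    have hk : j < T.toNat := by omega
    have := loopA H T obstacles hrow hT j hk (lev H obstacles j) []
    rw [List.append_nil] at this
    rw [List.nil_append] at this
    rw [this]
    have hlev : (lev H obstacles j).flatMap (succP H obstacles ((j : Int) + 1))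
        = lev H obstacles (j + 1) := by rfl
    rw [hlev]
    exact ih (j + 1) (by omega)

-- empty levels stay empty
lemma lev_empty_mono (H : Int) (obstacles : List (List Int)) :
    ∀ (j m : Nat), lev H obstacles j = [] → lev H obstacles (j + m) = [] := by
  intro j m
  induction m with
  | zero => intro h; exact h
  | succ m ih =>
    intro h
    have : j + (m + 1) = (j + m) + 1 := by omega
    rw [this]
    show (lev H obstacles (j + m)).flatMap _ = []
    rw [ih h]
    rfl

-- what A returns in the main case
lemma A_result (H T : Int) (obstacles : List (List Int))
    (hrow : ∀ m : Nat, m < T.toNat →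
      ∃ row, obstacles[m + 1]? = some row ∧ H ≤ (row.length : Int))
    (hT : 0 ≤ T) :
    BFS H T obstacles = ((lev H obstacles T.toNat).head?).map (·.2) := by
  have h0 : BFS H T obstacles
      = bfsLoop H T obstacles ((lev H obstacles 0).map (stateOf 0)) := rfl
  rw [h0, levelsA H T obstacles hrow hT T.toNat 0 (by omega)]
  rcases hl : lev H obstacles T.toNat with _ | ⟨p, rest⟩
  · simp [bfsLoop]
  · simp only [List.map_cons]
    rw [bfsLoop]
    have : ((stateOf T.toNat p).2.1 == T) = true := by
      simp only [stateOf, beq_iff_eq]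
      omega
    rw [this]
    simp [stateOf]


-- what B's level loop computes: the deduplicated levels, with A's head preserved
lemma Bside (H T : Int) (obstacles : List (List Int)) :
    ∀ (m j : Nat), m + j = T.toNat →
      levelsB H obstacles m ((j : Int) + 1)
          (((lev H obstacles j).foldl dstep (PySem.Set.empty, [])).2)
        = ((lev H obstacles T.toNat).head?).map (·.2) := by
  intro m
  induction m with
  | zero =>
    intro j hj
    rw [Nat.zero_add] at hj; subst hj
    show (((lev H obstacles T.toNat).foldl dstep (PySem.Set.empty, [])).2).head?.map (·.2) = _
    rw [dk_out_head]
  | succ m ih =>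
    intro j hj
    have hnxt : (stepB H obstacles ((j : Int) + 1)
          (((lev H obstacles j).foldl dstep (PySem.Set.empty, [])).2)).2
        = ((lev H obstacles (j + 1)).foldl dstep (PySem.Set.empty, [])).2 := by
      rw [stepB_eq]
      have hc := crux H obstacles ((j : Int) + 1) (lev H obstacles j) PySem.Set.empty
        (PySem.Set.empty, [])
        (by intro h hh; rw [PySem.Set.empty_eq] at hh; simp at hh)
      rw [← hc]
      rfl
    simp only [levelsB, hnxt]
    by_cases hemp : ((lev H obstacles (j + 1)).foldl dstep (PySem.Set.empty, [])).2 = []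
    · rw [if_pos hemp]
      have hlev : lev H obstacles (j + 1) = [] := by
        have hh := dk_out_head (lev H obstacles (j + 1))
        rw [hemp] at hh
        rcases hl : lev H obstacles (j + 1) with _ | ⟨q, l⟩
        · rfl
        · rw [hl] at hh; simp at hh
      have hTn : lev H obstacles T.toNat = [] := by
        obtain ⟨m', hm'⟩ : ∃ m', T.toNat = (j + 1) + m' := ⟨T.toNat - (j + 1), by omega⟩
        rw [hm']
        exact lev_empty_mono H obstacles (j + 1) m' hlev
      rw [hTn]
      rfl
    · rw [if_neg hemp]
      have hcast : ((j : Int) + 1) + 1 = (((j + 1 : Nat) : Int)) + 1 := by push_cast; ring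
      rw [hcast]
      exact ih (j + 1) (by omega)

theorem BFS_spec : Claim_equal_BFS := by
  unfold Claim_equal_BFS
  intro H T obstacles _ hpre
  unfold Spec_BFS
  by_cases hT0 : T = 0
  · subst hT0
    have hA : BFS H 0 obstacles = some [] := by
      rw [BFS, bfsLoop]
      simp
    have hB : BFS_alt H 0 obstacles = some [] := by simp [BFS_alt]
    rw [hA, hB]
  by_cases hH : H ≤ 0
  · have hs : successorsA H obstacles (0, 0, []) = some [] := by
      have h1 : ¬ (0 : Int) < H := by omega
      have h2 : ¬ (1 : Int) < H := by omega
      simp [successorsA, succAux, h1, h2]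
    have hA : BFS H T obstacles = none := by
      rw [BFS, bfsLoop]
      have hb : ((((0:Int), (0:Int), ([]:List Int))).2.1 == T) = false := by
        simp only [beq_eq_false_iff_ne, ne_eq]
        intro h
        exact hT0 (by omega)
      rw [hb]
      simp only [Bool.false_eq_true, if_false]
      rw [hs]
      show bfsLoop H T obstacles ([] ++ []) = none
      rw [show ([] ++ [] : List (Int × Int × List Int)) = [] from rfl, bfsLoop]
    have hB : BFS_alt H T obstacles = none := by
      rw [BFS_alt]
      rw [if_neg (by simp [hT0])]
      rw [if_pos (Or.inl hH)]
    rw [hA, hB]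
  · rcases hpre with h | h | ⟨hTpos, hlen, hrows⟩
    · exact absurd h hH
    · exact absurd h hT0
    have hrow : ∀ m : Nat, m < T.toNat →
        ∃ row, obstacles[m + 1]? = some row ∧ H ≤ (row.length : Int) := by
      intro m hm
      have hm1 : m + 1 < obstacles.length := by omega
      refine ⟨obstacles[m + 1], List.getElem?_eq_getElem hm1, ?_⟩
      apply hrows
      have hmem : obstacles[m + 1]
          = ((obstacles.drop 1).take T.toNat)[m]'(by
              simp only [List.length_take, List.length_drop]
              omega) := by
        rw [List.getElem_take, List.getElem_drop]
        congr 1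
        omega
      rw [hmem]
      exact List.getElem_mem _
    rw [A_result H T obstacles hrow (by omega)]
    rw [BFS_alt]
    rw [if_neg (by simp [hT0])]
    rw [if_neg (by omega)]
    have hstart : ([((0 : Int), ([] : List Int))])
        = (((lev H obstacles 0).foldl dstep (PySem.Set.empty, [])).2) := by
      simp [lev, dstep, PySem.Set.empty_eq]
    rw [hstart]
    have hb := Bside H T obstacles T.toNat 0 (by omega)
    simp only [Nat.cast_zero, zero_add] at hb
    exact hb.symm
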